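-- pv_equiv track=rewrite | github.com/erdo100/pooltool | Scripts/28_eventbased_loss_single/loss_funcs.py | compare_chronological_events
-- ===== SOURCE A (Python) =====
-- def compare_chronological_events(actual_events, sim_events):
--
--     actual_sequence = actual_events['events']
--     sim_sequence = sim_events['events']
--
--     # Compare sequences up to the length of the shorter one
--     max_length = max(len(actual_sequence), len(sim_sequence))
--     min_length = min(len(actual_sequence), len(sim_sequence))
--
--     event_matches = []
--     all_OK = True
--
--     # Compare event by event in chronological order
--     for i in range(max_length):
--         if i < len(actual_sequence) and i < len(sim_sequence):
--             # Both sequences have an event at this position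
--             actual_event = actual_sequence[i]
--             sim_event = sim_sequence[i]
--
--             if actual_event == sim_event and all_OK:
--                 event_matches.append(True)
--             else:
--                 event_matches.append(False)
--                 all_OK = False
--         else:
--             # One sequence is longer than the other
--             event_matches.append(False)
--
--     return event_matches
-- ===== SOURCE B (Python) =====
-- def _prefix_len(a, s):
--     n = 0
--     for x, y in zip(a, s):
--         if x != y:
--             return n
--         n += 1
--     return n
--
--
-- def compare_chronological_events(actual_events, sim_events):
--     a = actual_events['events']
--     s = sim_events['events']
--     p = _prefix_len(a, s)
--     return [True] * p + [False] * (max(len(a), len(s)) - p)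
-- ===== Notes on version B (the rewrite author's own statement) =====
-- stated objective: simpler
-- what changed: Replaces the position-by-position loop with an all_OK sentinel flag by computing the longest matching prefix length p over zip(actual, sim) and returning [True]*p + [False]*(max_len - p).
import Mathlib
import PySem

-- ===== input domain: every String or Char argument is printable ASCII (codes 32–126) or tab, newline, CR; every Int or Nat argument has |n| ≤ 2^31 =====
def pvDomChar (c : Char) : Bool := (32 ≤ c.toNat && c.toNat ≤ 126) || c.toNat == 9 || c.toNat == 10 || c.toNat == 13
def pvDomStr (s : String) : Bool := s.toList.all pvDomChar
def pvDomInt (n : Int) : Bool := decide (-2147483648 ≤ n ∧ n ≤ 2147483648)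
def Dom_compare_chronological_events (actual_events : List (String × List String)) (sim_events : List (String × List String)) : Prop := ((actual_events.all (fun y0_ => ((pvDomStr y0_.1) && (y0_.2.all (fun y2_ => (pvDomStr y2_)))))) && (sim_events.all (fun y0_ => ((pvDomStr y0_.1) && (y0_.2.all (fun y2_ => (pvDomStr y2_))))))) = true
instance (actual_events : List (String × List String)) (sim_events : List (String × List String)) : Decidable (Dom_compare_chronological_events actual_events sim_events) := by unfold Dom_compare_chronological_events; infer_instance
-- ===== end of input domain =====

-- B replaces A's single loop with its all_OK sentinel flag by a matching-prefix-length
-- computation followed by a two-block [True]*p ++ [False]*(max_len - p) construction (objective: simpler).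

-- ===== PORT A =====
def compare_chronological_events (actual_events : List (String × List String)) (sim_events : List (String × List String)) : List Bool :=
  -- actual_events['events'] / sim_events['events']; Pre_ guarantees the key is present (else KeyError)
  let actual_sequence := ((PySem.Dict.mk actual_events).get? "events").getD []
  let sim_sequence := ((PySem.Dict.mk sim_events).get? "events").getD []
  let max_length := max actual_sequence.length sim_sequence.length
  -- (min_length is computed by A but never used)
  (((List.range max_length).foldl (fun (st : List Bool × Bool) i =>
      if i < actual_sequence.length ∧ i < sim_sequence.length then
        let actual_event := actual_sequence.getD i ""   -- in-range index: getD is exact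
        let sim_event := sim_sequence.getD i ""
        if actual_event = sim_event ∧ st.2 = true then (st.1 ++ [true], st.2)
        else (st.1 ++ [false], false)
      else (st.1 ++ [false], st.2)) ([], true))).1

-- ===== PORT B =====
def pvPrefixLen : List String → List String → Nat
  | x :: xs, y :: ys => if x = y then pvPrefixLen xs ys + 1 else 0
  | _, _ => 0

def compare_chronological_events_alt (actual_events : List (String × List String)) (sim_events : List (String × List String)) : List Bool :=
  let a := ((PySem.Dict.mk actual_events).get? "events").getD []
  let s := ((PySem.Dict.mk sim_events).get? "events").getD []
  let p := pvPrefixLen a s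
  List.replicate p true ++ List.replicate (max a.length s.length - p) false

-- ===== PRECONDITION & SPEC =====
-- Pre_ excludes exactly the inputs where A raises KeyError: a dict without the 'events' key.
def Pre_compare_chronological_events (actual_events : List (String × List String)) (sim_events : List (String × List String)) : Prop :=
  ((PySem.Dict.mk actual_events).get? "events").isSome = true ∧ ((PySem.Dict.mk sim_events).get? "events").isSome = true
instance (actual_events : List (String × List String)) (sim_events : List (String × List String)) : Decidable (Pre_compare_chronological_events actual_events sim_events) := by unfold Pre_compare_chronological_events; infer_instance
def pvWitness_compare_chronological_events : (List (String × List String)) × (List (String × List String)) :=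
  ([("events", ["a", "b"])], [("events", ["a", "c"])])

def Spec_compare_chronological_events (actual_events : List (String × List String)) (sim_events : List (String × List String)) (out : List Bool) : Prop := out = compare_chronological_events_alt actual_events sim_events
instance (actual_events : List (String × List String)) (sim_events : List (String × List String)) (out : List Bool) : Decidable (Spec_compare_chronological_events actual_events sim_events out) := by unfold Spec_compare_chronological_events; infer_instance

-- ===== CLAIM (what is proved, stated in full; the proofs are below) =====
def Claim_equal_compare_chronological_events : Prop := ∀ (actual_events : List (String × List String)) (sim_events : List (String × List String)), Dom_compare_chronological_events actual_events sim_events → Pre_compare_chronological_events actual_events sim_events → Spec_compare_chronological_events actual_events sim_events (compare_chronological_events actual_events sim_events)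

-- ===== LEMMAS AND PROOFS =====

theorem pvPrefixLen_le (xs ys : List String) : pvPrefixLen xs ys ≤ min xs.length ys.length := by
  induction xs generalizing ys with
  | nil => simp [pvPrefixLen]
  | cons x xs ih =>
    cases ys with
    | nil => simp [pvPrefixLen]
    | cons y ys =>
      by_cases hxy : x = y
      · have := ih ys
        simp only [pvPrefixLen, if_pos hxy, List.length_cons]
        omega
      · simp [pvPrefixLen, hxy]

theorem pvPrefixLen_eq_of_lt (xs ys : List String) (i : Nat) (h : i < pvPrefixLen xs ys) :
    xs.getD i "" = ys.getD i "" := by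
  induction xs generalizing ys i with
  | nil => simp [pvPrefixLen] at h
  | cons x xs ih =>
    cases ys with
    | nil => simp [pvPrefixLen] at h
    | cons y ys =>
      simp only [pvPrefixLen] at h
      split at h
      · cases i with
        | zero => simpa using ‹x = y›
        | succ i => simpa using ih ys i (by omega)
      · omega

theorem pvPrefixLen_ne (xs ys : List String)
    (h : pvPrefixLen xs ys < min xs.length ys.length) :
    xs.getD (pvPrefixLen xs ys) "" ≠ ys.getD (pvPrefixLen xs ys) "" := by
  induction xs generalizing ys with
  | nil => simp at h
  | cons x xs ih =>
    cases ys with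
    | nil => simp at h
    | cons y ys =>
      by_cases hxy : x = y
      · simp only [pvPrefixLen, if_pos hxy, List.length_cons] at h ⊢
        simpa using ih ys (by omega)
      · simp only [pvPrefixLen, if_neg hxy]
        simpa using hxy

theorem pv_loop_spec (aseq sseq : List String) (n : Nat) :
    (List.range n).foldl (fun (st : List Bool × Bool) i =>
      if i < aseq.length ∧ i < sseq.length then
        if aseq.getD i "" = sseq.getD i "" ∧ st.2 = true then (st.1 ++ [true], st.2)
        else (st.1 ++ [false], false)
      else (st.1 ++ [false], st.2)) ([], true)
    = (List.replicate (min n (pvPrefixLen aseq sseq)) true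
        ++ List.replicate (n - min n (pvPrefixLen aseq sseq)) false,
       decide (min n (min aseq.length sseq.length) ≤ pvPrefixLen aseq sseq)) := by
  have hple := pvPrefixLen_le aseq sseq
  induction n with
  | zero => simp
  | succ n ih =>
    rw [List.range_succ, List.foldl_append, ih]
    simp only [List.foldl_cons, List.foldl_nil]
    by_cases hr : n < aseq.length ∧ n < sseq.length
    · rw [if_pos hr]
      by_cases hnp : n < pvPrefixLen aseq sseq
      · have heq : aseq.getD n "" = sseq.getD n "" := pvPrefixLen_eq_of_lt aseq sseq n hnp
        have hflag : decide (min n (min aseq.length sseq.length) ≤ pvPrefixLen aseq sseq) = true := by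
          simp only [decide_eq_true_iff]; omega
        have hflag' : decide (min (n + 1) (min aseq.length sseq.length) ≤ pvPrefixLen aseq sseq) = true := by
          simp only [decide_eq_true_iff]; omega
        rw [if_pos ⟨heq, hflag⟩]
        have h1 : min n (pvPrefixLen aseq sseq) = n := by omega
        have h2 : min (n + 1) (pvPrefixLen aseq sseq) = n + 1 := by omega
        rw [hflag, hflag', h1, h2]
        simp [List.replicate_succ' (n := n)]
      · have hbr : ¬ (aseq.getD n "" = sseq.getD n "" ∧ decide (min n (min aseq.length sseq.length) ≤ pvPrefixLen aseq sseq) = true) := by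
          by_cases hne : n = pvPrefixLen aseq sseq
          · intro hcon
            refine pvPrefixLen_ne aseq sseq (by omega) ?_
            rw [← hne]; exact hcon.1
          · intro hcon
            have := hcon.2
            simp only [decide_eq_true_iff] at this
            omega
        rw [if_neg hbr]
        have h1 : min n (pvPrefixLen aseq sseq) = pvPrefixLen aseq sseq := by omega
        have h2 : min (n + 1) (pvPrefixLen aseq sseq) = pvPrefixLen aseq sseq := by omega
        have h3 : decide (min (n + 1) (min aseq.length sseq.length) ≤ pvPrefixLen aseq sseq) = false := by
          simp only [decide_eq_false_iff_not]; omega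
        have h4 : n + 1 - pvPrefixLen aseq sseq = (n - pvPrefixLen aseq sseq) + 1 := by omega
        rw [h1, h2, h3, h4]
        simp [List.replicate_succ' (n := n - pvPrefixLen aseq sseq)]
    · rw [if_neg hr]
      have hnp : pvPrefixLen aseq sseq ≤ n := by omega
      have h1 : min n (pvPrefixLen aseq sseq) = pvPrefixLen aseq sseq := by omega
      have h2 : min (n + 1) (pvPrefixLen aseq sseq) = pvPrefixLen aseq sseq := by omega
      have h3 : min (n + 1) (min aseq.length sseq.length) = min n (min aseq.length sseq.length) := by omega
      have h4 : n + 1 - pvPrefixLen aseq sseq = (n - pvPrefixLen aseq sseq) + 1 := by omega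
      rw [h1, h2, h3, h4]
      simp [List.replicate_succ' (n := n - pvPrefixLen aseq sseq)]

-- ===== VERDICT (by name: the statement is the Claim_ definition above) =====
theorem compare_chronological_events_spec : Claim_equal_compare_chronological_events := by
  intro actual_events sim_events _hdom _hpre
  unfold Spec_compare_chronological_events compare_chronological_events compare_chronological_events_alt
  set aseq := ((PySem.Dict.mk actual_events).get? "events").getD [] with ha
  set sseq := ((PySem.Dict.mk sim_events).get? "events").getD [] with hs
  show ((List.range (max aseq.length sseq.length)).foldl (fun (st : List Bool × Bool) i =>
      if i < aseq.length ∧ i < sseq.length then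
        if aseq.getD i "" = sseq.getD i "" ∧ st.2 = true then (st.1 ++ [true], st.2)
        else (st.1 ++ [false], false)
      else (st.1 ++ [false], st.2)) ([], true)).1
    = List.replicate (pvPrefixLen aseq sseq) true
        ++ List.replicate (max aseq.length sseq.length - pvPrefixLen aseq sseq) false
  have hple := pvPrefixLen_le aseq sseq
  rw [pv_loop_spec]
  have h1 : min (max aseq.length sseq.length) (pvPrefixLen aseq sseq) = pvPrefixLen aseq sseq := by omega
  rw [h1]
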